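-- pv_equiv track=rewrite | github.com/amrit3701/FreeCAD-Reinforcement | BeamReinforcement/MainBeamReinforcement.py | getShearRebarType
-- ===== SOURCE A (Python) =====
-- def getShearRebarType(
--     number_diameter_offset_string, rebar_type_tuple
-- ):
--     sets = len(number_diameter_offset_string.split("+"))
--     rebar_type_list = []
--     for i in range(0, sets):
--         if len(rebar_type_tuple) > i:
--             rebar_type_list.append(rebar_type_tuple[i])
--         else:
--             rebar_type_list.append("StraightRebar")
--     return tuple(rebar_type_list)
-- ===== SOURCE B (Python) =====
-- def getShearRebarType(
--     number_diameter_offset_string, rebar_type_tuple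
-- ):
--     # Recursive co-traversal: walk the split groups and the provided types
--     # together; one type per group while types last, default afterwards.
--     def go(groups, types):
--         if not groups:
--             return ()
--         if types:
--             return (types[0],) + go(groups[1:], types[1:])
--         return ("StraightRebar",) + go(groups[1:], ())
--     return go(number_diameter_offset_string.split("+"), tuple(rebar_type_tuple))
-- ===== Notes on version B (the rewrite author's own statement) =====
-- stated objective: alternative
-- what changed: Replaces A's counted index loop (len of the split, range, len(tuple)>i branch, indexing) by a structural recursion that co-traverses the list of split groups and the type tuple, emitting one type per group while types last and the default afterwards; no lengths or indices are computed.
import Mathlib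
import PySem

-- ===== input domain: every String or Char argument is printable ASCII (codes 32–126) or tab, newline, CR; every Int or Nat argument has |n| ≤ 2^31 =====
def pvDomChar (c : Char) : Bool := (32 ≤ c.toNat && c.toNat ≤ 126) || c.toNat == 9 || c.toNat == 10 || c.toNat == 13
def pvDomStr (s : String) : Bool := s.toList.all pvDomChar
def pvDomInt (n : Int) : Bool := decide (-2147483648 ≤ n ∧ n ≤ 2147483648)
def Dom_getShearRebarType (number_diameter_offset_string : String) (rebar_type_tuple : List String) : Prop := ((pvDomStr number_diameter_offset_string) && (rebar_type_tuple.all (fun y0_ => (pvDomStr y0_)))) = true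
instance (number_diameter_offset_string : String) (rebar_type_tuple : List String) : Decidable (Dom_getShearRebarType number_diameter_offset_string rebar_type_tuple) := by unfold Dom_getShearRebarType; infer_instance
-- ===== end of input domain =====

-- B replaces A's counted index loop by a structural recursion co-traversing the
-- split groups and the type list (no lengths or indices): alternative decomposition.

-- ===== PORT A =====
def getShearRebarType (number_diameter_offset_string : String) (rebar_type_tuple : List String) : List String :=
  let sets : Nat := ((PySem.Str.split? number_diameter_offset_string "+").getD []).length  -- sep "+" nonempty: split? is always some
  (PySem.List.pyRange 0 (sets : Int) 1).foldl
    (fun acc i =>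
      if (rebar_type_tuple.length : Int) > i then
        acc ++ [PySem.List.pyGetD rebar_type_tuple i ""]   -- in this branch i is in range, default unused
      else
        acc ++ ["StraightRebar"]) []

-- ===== PORT B =====
-- Source B's recursive helper `go(groups, types)`
def getShearGo : List String → List String → List String
  | [], _ => []
  | _ :: gs, t :: ts => t :: getShearGo gs ts
  | _ :: gs, [] => "StraightRebar" :: getShearGo gs []

def getShearRebarType_alt (number_diameter_offset_string : String) (rebar_type_tuple : List String) : List String :=
  getShearGo ((PySem.Str.split? number_diameter_offset_string "+").getD []) rebar_type_tuple

-- ===== PRECONDITION & SPEC =====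
def Spec_getShearRebarType (number_diameter_offset_string : String) (rebar_type_tuple : List String) (out : List String) : Prop := out = getShearRebarType_alt number_diameter_offset_string rebar_type_tuple
instance (number_diameter_offset_string : String) (rebar_type_tuple : List String) (out : List String) : Decidable (Spec_getShearRebarType number_diameter_offset_string rebar_type_tuple out) := by unfold Spec_getShearRebarType; infer_instance

-- ===== CLAIM (what is proved, stated in full; the proofs are below) =====
def Claim_equal_getShearRebarType : Prop := ∀ (number_diameter_offset_string : String) (rebar_type_tuple : List String), Dom_getShearRebarType number_diameter_offset_string rebar_type_tuple → Spec_getShearRebarType number_diameter_offset_string rebar_type_tuple (getShearRebarType number_diameter_offset_string rebar_type_tuple)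

-- ===== LEMMAS AND PROOFS =====

-- Characterisation of B's co-traversal: first |groups| provided types, then defaults.
theorem getShearGo_eq (gs ts : List String) :
    getShearGo gs ts
      = ts.take gs.length ++ List.replicate (gs.length - (ts.take gs.length).length) "StraightRebar" := by
  induction gs generalizing ts with
  | nil => simp [getShearGo]
  | cons g gs ih =>
    cases ts with
    | nil => simp [getShearGo, ih, List.replicate_succ]
    | cons t ts =>
      simp only [getShearGo, ih, List.length_cons, List.take_succ_cons, List.cons_append,
        List.length_take]
      congr 2
      simp [List.length_take]

-- Invariant of A's loop: after n iterations the list built is the first n provided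
-- types followed by defaults filling up to length n.
theorem getShearRebarType_loop (t : List String) (n : Nat) :
    (PySem.List.pyRange 0 (n : Int) 1).foldl
      (fun acc i =>
        if (t.length : Int) > i then acc ++ [PySem.List.pyGetD t i ""]
        else acc ++ ["StraightRebar"]) []
    = t.take n ++ List.replicate (n - (t.take n).length) "StraightRebar" := by
  induction n with
  | zero => simp
  | succ n ih =>
    have hcast : ((n + 1 : Nat) : Int) = (n : Int) + 1 := by push_cast; ring
    rw [hcast, PySem.List.pyRange_one_succ_right (by positivity), List.foldl_append, ih]
    by_cases h : n < t.length
    · have hif : ((t.length : Int) > (n : Int)) := by exact_mod_cast h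
      have htake : t.take (n + 1) = t.take n ++ [t[n]] := by
        rw [List.take_add_one]; simp [List.getElem?_eq_getElem h]
      simp only [List.foldl_cons, List.foldl_nil, if_pos hif]
      rw [PySem.List.pyGetD_natCast, htake]
      simp [List.getD, List.getElem?_eq_getElem h, List.length_take,
        Nat.min_eq_left (Nat.le_of_lt h), Nat.min_eq_left (Nat.succ_le_of_lt h)]
    · have hle : t.length ≤ n := Nat.le_of_not_lt h
      have hif : ¬ ((t.length : Int) > (n : Int)) := by exact_mod_cast h
      have htake : t.take (n + 1) = t := List.take_of_length_le (by omega)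
      have htake' : t.take n = t := List.take_of_length_le hle
      simp only [List.foldl_cons, List.foldl_nil, if_neg hif, htake, htake']
      rw [List.append_assoc]
      congr 1
      have : n + 1 - t.length = (n - t.length) + 1 := by omega
      rw [this, List.replicate_succ']

-- ===== VERDICT (by name: the statement is the Claim_ definition above) =====
theorem getShearRebarType_spec : Claim_equal_getShearRebarType := by
  intro s t _
  unfold Spec_getShearRebarType getShearRebarType getShearRebarType_alt
  rw [getShearGo_eq]
  exact getShearRebarType_loop t _
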